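-- pv_equiv track=rewrite | github.com/eltobrgs/algorithms-exercises | Funçoes em python/funçoes para chamar/func_minnum.py | eh_o_menor
-- ===== SOURCE A (Python) =====
-- def eh_o_menor(numero, lista):
--     menor = lista[0]
--     for num in lista:
--         if num < menor:
--             menor = num
--     if numero == menor:
--         return True
--     else:
--         return False
-- ===== SOURCE B (Python) =====
-- def eh_o_menor(numero, lista):
--     return sorted(lista)[0] == numero
-- ===== Notes on version B (the rewrite author's own statement) =====
-- stated objective: simpler
-- what changed: B replaces the explicit running-minimum scan and if/else return with a one-liner that sorts the list and compares its first element to numero.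
import Mathlib
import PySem

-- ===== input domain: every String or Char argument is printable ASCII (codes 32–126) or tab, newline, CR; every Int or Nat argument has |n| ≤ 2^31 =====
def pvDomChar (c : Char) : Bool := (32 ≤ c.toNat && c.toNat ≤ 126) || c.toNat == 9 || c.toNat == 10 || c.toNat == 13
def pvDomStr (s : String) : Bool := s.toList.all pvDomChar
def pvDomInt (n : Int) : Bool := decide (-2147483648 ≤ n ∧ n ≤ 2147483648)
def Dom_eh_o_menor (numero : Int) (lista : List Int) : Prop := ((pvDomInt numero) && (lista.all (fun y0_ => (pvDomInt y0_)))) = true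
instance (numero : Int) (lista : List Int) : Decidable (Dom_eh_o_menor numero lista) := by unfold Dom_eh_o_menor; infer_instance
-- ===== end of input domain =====

-- B sorts the list and compares its first element to numero, instead of A's running-minimum scan (objective: simpler).

-- ===== PORT A =====
def eh_o_menor (numero : Int) (lista : List Int) : Bool :=
  match PySem.List.pyGet? lista 0 with
  | none => false   -- lista[0] raises IndexError on []; excluded by Pre_
  | some m0 =>
    let menor := lista.foldl (fun menor num => if num < menor then num else menor) m0
    if numero == menor then true else false

-- ===== PORT B =====
def eh_o_menor_alt (numero : Int) (lista : List Int) : Bool :=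
  match PySem.List.pyGet? (PySem.List.sorted lista (fun x => x) false) 0 with
  | none => false   -- sorted(lista)[0] raises IndexError on []; excluded by Pre_
  | some m => m == numero

-- ===== PRECONDITION & SPEC =====
-- A (and B) raise IndexError on the empty list; both indexings are excluded.
def Pre_eh_o_menor (numero : Int) (lista : List Int) : Prop := lista ≠ []
instance (numero : Int) (lista : List Int) : Decidable (Pre_eh_o_menor numero lista) := by unfold Pre_eh_o_menor; infer_instance
def pvWitness_eh_o_menor : Int × List Int := (2, [3, 2, 5])

def Spec_eh_o_menor (numero : Int) (lista : List Int) (out : Bool) : Prop := out = eh_o_menor_alt numero lista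
instance (numero : Int) (lista : List Int) (out : Bool) : Decidable (Spec_eh_o_menor numero lista out) := by unfold Spec_eh_o_menor; infer_instance

-- ===== CLAIM (what is proved, stated in full; the proofs are below) =====
def Claim_equal_eh_o_menor : Prop := ∀ (numero : Int) (lista : List Int), Dom_eh_o_menor numero lista → Pre_eh_o_menor numero lista → Spec_eh_o_menor numero lista (eh_o_menor numero lista)

-- ===== LEMMAS AND PROOFS =====

-- the fold's result is a lower bound of the initial accumulator and of every element
theorem foldMin_le (xs : List Int) (a : Int) :
    xs.foldl (fun menor num => if num < menor then num else menor) a ≤ a ∧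
    ∀ y ∈ xs, xs.foldl (fun menor num => if num < menor then num else menor) a ≤ y := by
  induction xs generalizing a with
  | nil => simp
  | cons x t ih =>
    simp only [List.foldl_cons, List.mem_cons]
    constructor
    · have h1 := (ih (if x < a then x else a)).1
      have h2 : (if x < a then x else a) ≤ a := by split_ifs <;> omega
      omega
    · intro y hy
      rcases hy with rfl | hy
      · have h1 := (ih (if y < a then y else a)).1
        have h2 : (if y < a then y else a) ≤ y := by split_ifs <;> omega
        omega
      · exact (ih _).2 y hy

-- the fold's result is the accumulator or one of the elements
theorem foldMin_mem (xs : List Int) (a : Int) :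
    xs.foldl (fun menor num => if num < menor then num else menor) a = a ∨
    xs.foldl (fun menor num => if num < menor then num else menor) a ∈ xs := by
  induction xs generalizing a with
  | nil => simp
  | cons x t ih =>
    simp only [List.foldl_cons, List.mem_cons]
    rcases ih (if x < a then x else a) with h | h
    · rw [h]; split_ifs with hx
      · exact Or.inr (Or.inl rfl)
      · exact Or.inl rfl
    · exact Or.inr (Or.inr h)

-- ===== VERDICT (by name: the statement is the Claim_ definition above) =====
theorem eh_o_menor_spec : Claim_equal_eh_o_menor := by
  intro numero lista _ hpre
  unfold Spec_eh_o_menor eh_o_menor eh_o_menor_alt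
  obtain ⟨x, xs, rfl⟩ := List.exists_cons_of_ne_nil hpre
  have hs : PySem.List.sorted (x :: xs) (fun x => x) false ≠ [] := by
    intro h
    exact (List.cons_ne_nil x xs) ((PySem.List.sorted_eq_nil_iff _ _ _).mp h)
  obtain ⟨m, t, hmt⟩ := List.exists_cons_of_ne_nil hs
  have hget1 : PySem.List.pyGet? (x :: xs) 0 = some x := by
    simp [PySem.List.pyGet?, PySem.List.pyIdx?]
  have hget2 : PySem.List.pyGet? (PySem.List.sorted (x :: xs) (fun x => x) false) 0 = some m := by
    rw [hmt]; simp [PySem.List.pyGet?, PySem.List.pyIdx?]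
  have hfold : (x :: xs).foldl (fun menor num => if num < menor then num else menor) x
      = xs.foldl (fun menor num => if num < menor then num else menor) x := by
    simp only [List.foldl_cons, lt_self_iff_false, if_false]
  have hMmem : xs.foldl (fun menor num => if num < menor then num else menor) x ∈ x :: xs := by
    rcases foldMin_mem (x :: xs) x with h | h
    · rw [hfold] at h; rw [h]; exact List.mem_cons_self
    · rw [hfold] at h; exact h
  have hMle : ∀ y ∈ x :: xs, xs.foldl (fun menor num => if num < menor then num else menor) x ≤ y := by
    intro y hy
    have := (foldMin_le (x :: xs) x).2 y hy
    rwa [hfold] at this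
  have hmmem : m ∈ x :: xs := (PySem.List.mem_sorted _ _ _ _).mp (by rw [hmt]; exact List.mem_cons_self)
  have hmle : ∀ y ∈ x :: xs, m ≤ y := fun y hy => PySem.List.key_head_sorted_le _ _ hmt y hy
  have hEq : xs.foldl (fun menor num => if num < menor then num else menor) x = m :=
    le_antisymm (hMle m hmmem) (hmle _ hMmem)
  rw [hget1, hget2]
  simp only [List.foldl_cons, lt_self_iff_false, if_false, hEq]
  by_cases h : numero = m
  · simp [h]
  · simp only [beq_iff_eq, if_neg (by simpa using h)]
    exact (Bool.false_eq _).mpr (by simpa using fun hh => h hh.symm)
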